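-- pv_equiv track=rewrite | github.com/GGirard-04/IB-Math-HL-IA-Code | mathia.py | recursive_worker
-- ===== SOURCE A (Python) =====
-- from typing import List
--
-- def recursive_worker(input_set: str, prev_chars: str, target_depth: int) -> List[str]:
--
--     # List of all permutations from higher recursion depths to return to the parent function
--     return_list = []
--
--     if len(prev_chars) + 1 == target_depth:
--         # We are at the final recursion depth, we do not need to spawn any more workers, so we
--         # add the final permutations to the return list, one for each character in the input
--         # set with the character at the end. Everything that is returned upstream originates
--         # here
--         for character in input_set:
--             return_list.append(prev_chars + character)
--     else:
--         # We still need to go deeper recursively, so for each character in the input set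
--         # spawn a new worker with this worker's start string plus a character. This will
--         # spawn one worker for each character in the input set
--         for character in input_set:
--             return_list += recursive_worker(input_set, prev_chars + character, target_depth)
--
--     # Return the list, which will either be a set of final items if this is at the maximum
--     # recursion depth, or a collection of all of the items returned from all of the
--     # recursive workers which this instance spawned
--     return return_list
-- ===== SOURCE B (Python) =====
-- from typing import List
--
-- def recursive_worker(input_set: str, prev_chars: str, target_depth: int) -> List[str]:
--     # Bottom-up: start from the prefix and extend by one character per level,
--     # k = target_depth - len(prev_chars) levels in total (lexicographic order preserved).
--     k = target_depth - len(prev_chars)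
--     if k <= 0:
--         return []
--     level = [prev_chars]
--     for _ in range(k):
--         level = [s + c for s in level for c in input_set]
--     return level
-- ===== Notes on version B (the rewrite author's own statement) =====
-- stated objective: idiomatic
-- what changed: Replaces the prefix-passing tree recursion with a flat bottom-up loop that starts from [prev_chars] and extends every string in the current level by one character per iteration, for target_depth - len(prev_chars) iterations.
-- crash fix: When input_set is nonempty and len(prev_chars) >= target_depth, A recurses forever and raises RecursionError; B returns [] (no strings of the target length extend prev_chars). — e.g. on recursive_worker("a", "ab", 1): A raises RecursionError, B returns []
import Mathlib
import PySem

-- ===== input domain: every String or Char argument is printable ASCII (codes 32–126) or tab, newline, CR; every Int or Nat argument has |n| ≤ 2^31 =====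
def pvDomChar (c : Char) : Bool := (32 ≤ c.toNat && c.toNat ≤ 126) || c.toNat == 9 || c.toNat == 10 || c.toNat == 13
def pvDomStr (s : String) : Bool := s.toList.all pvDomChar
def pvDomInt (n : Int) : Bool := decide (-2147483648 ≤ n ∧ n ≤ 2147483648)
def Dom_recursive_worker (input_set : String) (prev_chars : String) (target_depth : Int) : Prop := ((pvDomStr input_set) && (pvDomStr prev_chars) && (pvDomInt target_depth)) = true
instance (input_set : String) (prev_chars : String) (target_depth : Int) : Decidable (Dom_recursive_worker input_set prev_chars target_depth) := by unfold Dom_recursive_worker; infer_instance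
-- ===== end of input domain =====

-- B replaces A's prefix-passing tree recursion by an iterative level-by-level extension loop (idiomatic, same cost).


-- ===== PORT A =====
-- A's recursion is made total with a fuel argument; the entry point passes fuel
-- (target_depth - len(prev_chars)).toNat, which is exactly the remaining recursion depth on
-- every input where the Python returns (the fuel-0 else-branch is reached on Pre_ only with
-- input_set = "", where the Python loop also produces []).
def recWorkerFuel (fuel : Nat) (input_set : List Char) (prev_chars : List Char) (target_depth : Int) : List (List Char) :=
  if (PySem.Chars.len prev_chars : Int) + 1 = target_depth then
    input_set.foldl (fun acc c => acc ++ [prev_chars ++ [c]]) []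
  else
    match fuel with
    | 0 => []
    | f + 1 => input_set.foldl (fun acc c => acc ++ recWorkerFuel f input_set (prev_chars ++ [c]) target_depth) []

def recursive_worker (input_set : String) (prev_chars : String) (target_depth : Int) : List String :=
  (recWorkerFuel (target_depth - (PySem.Str.len prev_chars : Int)).toNat input_set.toList prev_chars.toList target_depth).map String.ofList

-- ===== PORT B =====
def recursive_worker_alt (input_set : String) (prev_chars : String) (target_depth : Int) : List String :=
  let k : Int := target_depth - (PySem.Str.len prev_chars : Int)
  if k ≤ 0 then []
  else
    ((List.range k.toNat).foldl
      (fun level _ => level.flatMap (fun st => input_set.toList.map (fun c => st ++ [c])))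
      [prev_chars.toList]).map String.ofList

-- ===== PRECONDITION & SPEC =====
-- Pre_ excludes exactly the inputs where the Python A recurses without bound (RecursionError):
-- a nonempty input_set with len(prev_chars) >= target_depth.
def Pre_recursive_worker (input_set : String) (prev_chars : String) (target_depth : Int) : Prop :=
  input_set = "" ∨ (PySem.Str.len prev_chars : Int) < target_depth
instance (input_set : String) (prev_chars : String) (target_depth : Int) : Decidable (Pre_recursive_worker input_set prev_chars target_depth) := by unfold Pre_recursive_worker; infer_instance

def pvWitness_recursive_worker : String × String × Int := ("ab", "x", 3)

-- When input_set is nonempty and len(prev_chars) >= target_depth, A recurses forever and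
-- raises RecursionError; B returns [] (no strings of the target length extend prev_chars).
def Raises_recursive_worker (input_set : String) (prev_chars : String) (target_depth : Int) : Prop :=
  input_set ≠ "" ∧ target_depth ≤ (PySem.Str.len prev_chars : Int)
instance (input_set : String) (prev_chars : String) (target_depth : Int) : Decidable (Raises_recursive_worker input_set prev_chars target_depth) := by unfold Raises_recursive_worker; infer_instance
def pvRaiseWitness_recursive_worker : String × String × Int := ("a", "ab", 1)
def pvRaiseWitnessOut_recursive_worker : List String := []

def Spec_recursive_worker (input_set : String) (prev_chars : String) (target_depth : Int) (out : List String) : Prop := out = recursive_worker_alt input_set prev_chars target_depth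
instance (input_set : String) (prev_chars : String) (target_depth : Int) (out : List String) : Decidable (Spec_recursive_worker input_set prev_chars target_depth out) := by unfold Spec_recursive_worker; infer_instance

-- ===== CLAIM (what is proved, stated in full; the proofs are below) =====
def Claim_equal_recursive_worker : Prop := ∀ (input_set : String) (prev_chars : String) (target_depth : Int), Dom_recursive_worker input_set prev_chars target_depth → Pre_recursive_worker input_set prev_chars target_depth → Spec_recursive_worker input_set prev_chars target_depth (recursive_worker input_set prev_chars target_depth)

def Claim_raises_recursive_worker : Prop := (∀ (input_set : String) (prev_chars : String) (target_depth : Int), Dom_recursive_worker input_set prev_chars target_depth → Raises_recursive_worker input_set prev_chars target_depth → ¬ Pre_recursive_worker input_set prev_chars target_depth) ∧ (Dom_recursive_worker (pvRaiseWitness_recursive_worker.1) (pvRaiseWitness_recursive_worker.2.1) (pvRaiseWitness_recursive_worker.2.2) ∧ Raises_recursive_worker (pvRaiseWitness_recursive_worker.1) (pvRaiseWitness_recursive_worker.2.1) (pvRaiseWitness_recursive_worker.2.2) ∧ recursive_worker_alt (pvRaiseWitness_recursive_worker.1) (pvRaiseWitness_recursive_worker.2.1) (pvRaiseWitness_recursive_worker.2.2)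 = pvRaiseWitnessOut_recursive_worker)

-- ===== LEMMAS AND PROOFS =====

-- one level of B's loop: extend every string of the level by one character
def pvStep (s : List Char) (level : List (List Char)) : List (List Char) :=
  level.flatMap (fun st => s.map (fun c => st ++ [c]))

lemma pvStep_append (s : List Char) (l1 l2 : List (List Char)) :
    pvStep s (l1 ++ l2) = pvStep s l1 ++ pvStep s l2 := by
  simp [pvStep]

lemma pvStep_iterate_append (s : List Char) (n : Nat) (l1 l2 : List (List Char)) :
    (pvStep s)^[n] (l1 ++ l2) = (pvStep s)^[n] l1 ++ (pvStep s)^[n] l2 := by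
  induction n generalizing l1 l2 with
  | zero => rfl
  | succ m ih => simp only [Function.iterate_succ_apply, pvStep_append, ih]

lemma pvStep_iterate_nil (s : List Char) (n : Nat) : (pvStep s)^[n] [] = [] := by
  induction n with
  | zero => rfl
  | succ m ih => simp only [Function.iterate_succ_apply, pvStep, List.flatMap_nil, ih]

lemma pvStep_iterate_flatMap (s : List Char) (n : Nat) (l : List (List Char)) :
    (pvStep s)^[n] l = l.flatMap (fun x => (pvStep s)^[n] [x]) := by
  induction l with
  | nil => simp [pvStep_iterate_nil]
  | cons x rest ih =>
      have : x :: rest = [x] ++ rest := rfl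
      rw [this, pvStep_iterate_append, ih]
      simp

lemma pvFoldl_range_step (s : List Char) (n : Nat) (init : List (List Char)) :
    (List.range n).foldl (fun level _ => level.flatMap (fun st => s.map (fun c => st ++ [c]))) init
      = (pvStep s)^[n] init := by
  induction n with
  | zero => rfl
  | succ m ih =>
      rw [List.range_succ, List.foldl_append, ih, List.foldl_cons, List.foldl_nil,
        Function.iterate_succ_apply']
      rfl

-- A's fuelled recursion computes exactly k levels of B's extension loop
lemma recWorkerFuel_eq_iterate (s : List Char) (k : Nat) (hk : 0 < k) :
    ∀ (p : List Char) (t : Int), (p.length : Int) + k = t →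
      recWorkerFuel k s p t = (pvStep s)^[k] [p] := by
  induction k with
  | zero => omega
  | succ m ih =>
      intro p t ht
      by_cases hm : m = 0
      · subst hm
        have hcond : (PySem.Chars.len p : Int) + 1 = t := by
          simp only [PySem.Chars.len_eq]; omega
        rw [recWorkerFuel, if_pos hcond, PySem.List.foldl_append_singleton_eq_map]
        simp [pvStep]
      · have hcond : ¬ ((PySem.Chars.len p : Int) + 1 = t) := by
          simp only [PySem.Chars.len_eq]; omega
        rw [recWorkerFuel, if_neg hcond]
        rw [PySem.List.foldl_append_eq_flatMap]
        have hrec : ∀ c, recWorkerFuel m s (p ++ [c]) t = (pvStep s)^[m] [p ++ [c]] := by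
          intro c
          exact ih (Nat.pos_of_ne_zero hm) (p ++ [c]) t (by simp; omega)
        calc s.flatMap (fun c => recWorkerFuel m s (p ++ [c]) t)
            = s.flatMap (fun c => (pvStep s)^[m] [p ++ [c]]) := by
              exact List.flatMap_congr (fun c _ => hrec c)
          _ = (s.map (fun c => p ++ [c])).flatMap (fun x => (pvStep s)^[m] [x]) := by
              rw [List.flatMap_map]
          _ = (pvStep s)^[m] (s.map (fun c => p ++ [c])) := by
              rw [pvStep_iterate_flatMap]
          _ = (pvStep s)^[m] (pvStep s [p]) := by simp [pvStep]
          _ = (pvStep s)^[m + 1] [p] := by rw [Function.iterate_succ_apply]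

-- ===== VERDICT (by name: the statement is the Claim_ definition above) =====
theorem recursive_worker_spec : Claim_equal_recursive_worker := by
  intro s p t _ hpre
  unfold Spec_recursive_worker recursive_worker recursive_worker_alt
  by_cases hk : t - (PySem.Str.len p : Int) ≤ 0
  · -- degenerate: Pre_ forces input_set = "" here, but the ports agree regardless:
    -- fuel is 0 and the final-depth test fails, so A's port yields []; B returns [].
    have hfuel : (t - (PySem.Str.len p : Int)).toNat = 0 := by omega
    have hlen : ¬ ((PySem.Chars.len p.toList : Int) + 1 = t) := by
      simp only [PySem.Chars.len_eq]
      simp only [PySem.Str.len_eq] at hk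
      omega
    rw [hfuel, recWorkerFuel, if_neg hlen, if_pos hk]
    simp
  · have hpos : 0 < (t - (PySem.Str.len p : Int)).toNat := by omega
    have hsum : ((p.toList.length : Int)) + ((t - (PySem.Str.len p : Int)).toNat : Int) = t := by
      simp only [PySem.Str.len_eq] at *
      omega
    rw [recWorkerFuel_eq_iterate s.toList _ hpos p.toList t hsum]
    rw [if_neg hk]
    rw [pvFoldl_range_step]

@[simp] theorem recursive_worker_raises : Claim_raises_recursive_worker := by
  unfold Claim_raises_recursive_worker
  constructor
  · intro s p t _ hr hpre
    rcases hr with ⟨hs, hle⟩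
    rcases hpre with h | h
    · exact hs h
    · omega
  · refine ⟨by decide, by decide, by decide⟩
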